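-- pv_equiv track=rewrite | github.com/Shubhampateloo7ajgit/Symptom-Checker-Bot | chatbot.py | get_advice
-- ===== SOURCE A (Python) =====
-- def get_advice(symptoms):
--     advice_db = {
--         "fever": "You have fever. Drink water and take rest.",
--         "cough": "You have cough. Try honey and warm water.",
--         "headache": "You have headache. Rest in a quiet place.",
--         "stomach pain": "You have stomach pain. Avoid heavy food.",
--         "sore throat": "You have sore throat. Gargle with warm salt water.",
--         "cold": "You have cold. Take vitamin C and stay warm.",
--         "fatigue": "You feel tired. Take rest and eat healthy.",
--         "vomiting": "You are vomiting. Drink fluids slowly.",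
--         "diarrhea": "You have diarrhea. Drink ORS and stay hydrated.",
--         "chest pain": "Chest pain is serious. Please go to a hospital immediately!",
--         "difficulty breathing": "Difficulty breathing is an emergency. Call a doctor now!"
--     }
--
--     for symptom in symptoms:
--         if symptom in ["chest pain", "difficulty breathing"]:
--             return advice_db[symptom]
--
--     advice = []
--     for symptom in symptoms:
--         if symptom in advice_db:
--             advice.append(advice_db[symptom])
--
--     if not advice:
--         return "Sorry, I did not understand your symptoms. Please see a doctor."
--
--     return " ".join(advice) + " If you do not feel better, please consult a doctor."
-- ===== SOURCE B (Python) =====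
-- ADVICE_DB = {
--     "fever": "You have fever. Drink water and take rest.",
--     "cough": "You have cough. Try honey and warm water.",
--     "headache": "You have headache. Rest in a quiet place.",
--     "stomach pain": "You have stomach pain. Avoid heavy food.",
--     "sore throat": "You have sore throat. Gargle with warm salt water.",
--     "cold": "You have cold. Take vitamin C and stay warm.",
--     "fatigue": "You feel tired. Take rest and eat healthy.",
--     "vomiting": "You are vomiting. Drink fluids slowly.",
--     "diarrhea": "You have diarrhea. Drink ORS and stay hydrated.",
--     "chest pain": "Chest pain is serious. Please go to a hospital immediately!",
--     "difficulty breathing": "Difficulty breathing is an emergency. Call a doctor now!"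
-- }
--
-- EMERGENCIES = ("chest pain", "difficulty breathing")
--
-- def get_advice(symptoms):
--     # single pass: record the first emergency seen, otherwise collect advice
--     emergency = None
--     advice = []
--     for symptom in symptoms:
--         if emergency is None:
--             if symptom in EMERGENCIES:
--                 emergency = symptom
--             elif symptom in ADVICE_DB:
--                 advice.append(ADVICE_DB[symptom])
--     if emergency is not None:
--         return ADVICE_DB[emergency]
--     if not advice:
--         return "Sorry, I did not understand your symptoms. Please see a doctor."
--     return " ".join(advice) + " If you do not feel better, please consult a doctor."
-- ===== Notes on version B (the rewrite author's own statement) =====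
-- stated objective: simpler
-- what changed: Replaces A's two sequential scans (one to find an emergency, one to collect advice) with a single pass that records the first emergency seen and otherwise accumulates advice, deciding the result once at the end.
import Mathlib
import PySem

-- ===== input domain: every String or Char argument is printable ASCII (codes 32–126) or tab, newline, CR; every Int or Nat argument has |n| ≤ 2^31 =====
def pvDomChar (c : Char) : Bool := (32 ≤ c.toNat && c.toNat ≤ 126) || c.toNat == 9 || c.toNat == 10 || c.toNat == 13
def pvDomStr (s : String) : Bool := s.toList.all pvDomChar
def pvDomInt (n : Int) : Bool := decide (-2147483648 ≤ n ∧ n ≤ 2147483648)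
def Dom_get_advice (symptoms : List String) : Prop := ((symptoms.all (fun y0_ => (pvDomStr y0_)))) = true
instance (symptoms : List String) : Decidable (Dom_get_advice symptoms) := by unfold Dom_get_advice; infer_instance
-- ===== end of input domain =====

-- B replaces A's two sequential scans with a single pass recording the first emergency; same values, no speed claim.

-- ===== PORT A =====
def adviceDb : PySem.Dict String String := PySem.Dict.ofList
  [("fever", "You have fever. Drink water and take rest."),
   ("cough", "You have cough. Try honey and warm water."),
   ("headache", "You have headache. Rest in a quiet place."),
   ("stomach pain", "You have stomach pain. Avoid heavy food."),
   ("sore throat", "You have sore throat. Gargle with warm salt water."),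
   ("cold", "You have cold. Take vitamin C and stay warm."),
   ("fatigue", "You feel tired. Take rest and eat healthy."),
   ("vomiting", "You are vomiting. Drink fluids slowly."),
   ("diarrhea", "You have diarrhea. Drink ORS and stay hydrated."),
   ("chest pain", "Chest pain is serious. Please go to a hospital immediately!"),
   ("difficulty breathing", "Difficulty breathing is an emergency. Call a doctor now!")]

-- first loop of A: return advice_db[symptom] on the first emergency symptom
def get_advice_loop1 : List String → Option String
  | [] => none
  | s :: rest =>
    if s ∈ (["chest pain", "difficulty breathing"] : List String) then
      some (PySem.Dict.getD adviceDb s "")          -- advice_db[s]; s is a key, so getD is exact here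
    else get_advice_loop1 rest

def get_advice (symptoms : List String) : String :=
  match get_advice_loop1 symptoms with
  | some r => r
  | none =>
    let advice := symptoms.foldl
      (fun acc s => if (PySem.Dict.get? adviceDb s).isSome then acc ++ [PySem.Dict.getD adviceDb s ""] else acc) []
    if advice = [] then "Sorry, I did not understand your symptoms. Please see a doctor."
    else PySem.Str.join " " advice ++ " If you do not feel better, please consult a doctor."

-- ===== PORT B =====
-- single pass: state = (first emergency seen, advice collected); decision after the loop
def get_advice_alt_loop : List String → Option String → List String → String
  | [], emergency, advice =>
    match emergency with
    | some e => PySem.Dict.getD adviceDb e ""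
    | none =>
      if advice = [] then "Sorry, I did not understand your symptoms. Please see a doctor."
      else PySem.Str.join " " advice ++ " If you do not feel better, please consult a doctor."
  | s :: rest, emergency, advice =>
    match emergency with
    | some e => get_advice_alt_loop rest (some e) advice
    | none =>
      if s ∈ (["chest pain", "difficulty breathing"] : List String) then
        get_advice_alt_loop rest (some s) advice
      else if (PySem.Dict.get? adviceDb s).isSome then
        get_advice_alt_loop rest none (advice ++ [PySem.Dict.getD adviceDb s ""])
      else get_advice_alt_loop rest none advice

def get_advice_alt (symptoms : List String) : String :=
  get_advice_alt_loop symptoms none []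

-- ===== PRECONDITION & SPEC =====
def Spec_get_advice (symptoms : List String) (out : String) : Prop := out = get_advice_alt symptoms
instance (symptoms : List String) (out : String) : Decidable (Spec_get_advice symptoms out) := by unfold Spec_get_advice; infer_instance

-- ===== CLAIM (what is proved, stated in full; the proofs are below) =====
def Claim_equal_get_advice : Prop := ∀ (symptoms : List String), Dom_get_advice symptoms → Spec_get_advice symptoms (get_advice symptoms)

-- ===== LEMMAS AND PROOFS =====

-- once an emergency is recorded, the rest of the pass is inert
theorem alt_loop_some (xs : List String) (e : String) (adv : List String) :
    get_advice_alt_loop xs (some e) adv = PySem.Dict.getD adviceDb e "" := by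
  induction xs with
  | nil => rfl
  | cons s rest ih => simpa [get_advice_alt_loop] using ih

-- the fused pass agrees with A's "first emergency, else fold" shape, for any advice accumulator
theorem main_lemma (xs : List String) (adv : List String) :
    (match get_advice_loop1 xs with
     | some r => r
     | none =>
       let advice := xs.foldl
         (fun acc s => if (PySem.Dict.get? adviceDb s).isSome then acc ++ [PySem.Dict.getD adviceDb s ""] else acc) adv
       if advice = [] then "Sorry, I did not understand your symptoms. Please see a doctor."
       else PySem.Str.join " " advice ++ " If you do not feel better, please consult a doctor.") =
    get_advice_alt_loop xs none adv := by
  induction xs generalizing adv with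
  | nil => rfl
  | cons s rest ih =>
    by_cases h : s ∈ (["chest pain", "difficulty breathing"] : List String)
    · simp [get_advice_loop1, get_advice_alt_loop, h, alt_loop_some]
    · by_cases hdb : (PySem.Dict.get? adviceDb s).isSome
      · simpa [get_advice_loop1, get_advice_alt_loop, h, hdb] using
          ih (adv ++ [PySem.Dict.getD adviceDb s ""])
      · simpa [get_advice_loop1, get_advice_alt_loop, h, hdb] using ih adv

-- ===== VERDICT (by name: the statement is the Claim_ definition above) =====
theorem get_advice_spec : Claim_equal_get_advice := by
  intro symptoms _
  unfold Spec_get_advice get_advice get_advice_alt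
  exact main_lemma symptoms []
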